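-- pv_equiv track=rewrite | github.com/trolen/advent-of-code | 2020/day20/day20.py | _encode_side
-- ===== SOURCE A (Python) =====
-- def _encode_side(line):
--     n1 = 0
--     n2 = 0
--     l = len(line)
--     for i in range(0, l):
--         if line[i] == '#':
--             n1 += 1 << (l - 1 - i)
--             n2 += 1 << i
--     return (n1, n2)
-- ===== SOURCE B (Python) =====
-- def _encode_side(line):
--     # Horner's method: two running accumulators instead of per-index bit shifts.
--     n1 = 0
--     for c in line:
--         n1 = 2 * n1 + (1 if c == '#' else 0)
--     n2 = 0
--     for c in reversed(line):
--         n2 = 2 * n2 + (1 if c == '#' else 0)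
--     return (n1, n2)
-- ===== Notes on version B (the rewrite author's own statement) =====
-- stated objective: simpler
-- what changed: Replaces per-index bit shifts 1<<(l-1-i)/1<<i with two Horner-style multiply-accumulate passes (forward and reversed), needing no length or index arithmetic.
import Mathlib
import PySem

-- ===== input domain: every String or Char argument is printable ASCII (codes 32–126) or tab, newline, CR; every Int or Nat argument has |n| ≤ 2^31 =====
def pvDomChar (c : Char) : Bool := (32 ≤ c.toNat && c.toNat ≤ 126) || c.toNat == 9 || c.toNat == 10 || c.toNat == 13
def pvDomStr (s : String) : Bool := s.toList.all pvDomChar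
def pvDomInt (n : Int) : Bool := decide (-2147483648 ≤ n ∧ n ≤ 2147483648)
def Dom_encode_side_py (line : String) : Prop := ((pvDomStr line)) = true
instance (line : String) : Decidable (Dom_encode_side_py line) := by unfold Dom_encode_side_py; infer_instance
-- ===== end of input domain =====

-- B replaces the per-index bit shifts with two Horner-style multiply-accumulate passes (simpler, same cost).
-- ===== PORT A =====
def encode_side_py (line : String) : Int × Int :=
  let l : Int := PySem.Str.len line
  (PySem.List.pyRange 0 l 1).foldl
    (fun st i =>
      if PySem.Str.pyGet? line i = some '#' then
        -- '1 << k' ported as '2 ^ k'; both exponents are nonnegative for i in range(0, l)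
        (st.1 + 2 ^ (l - 1 - i).toNat, st.2 + 2 ^ i.toNat)
      else st)
    (0, 0)

-- ===== PORT B =====
def hstep (n : Int) (c : Char) : Int := 2 * n + (if c = '#' then 1 else 0)

def encode_side_py_alt (line : String) : Int × Int :=
  (line.toList.foldl hstep 0, line.toList.reverse.foldl hstep 0)

-- ===== PRECONDITION & SPEC =====
def Spec_encode_side_py (line : String) (out : Int × Int) : Prop := out = encode_side_py_alt line
instance (line : String) (out : Int × Int) : Decidable (Spec_encode_side_py line out) := by unfold Spec_encode_side_py; infer_instance

-- ===== CLAIM (what is proved, stated in full; the proofs are below) =====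
def Claim_equal_encode_side_py : Prop := ∀ (line : String), Dom_encode_side_py line → Spec_encode_side_py line (encode_side_py line)

-- ===== LEMMAS AND PROOFS =====

-- ===== VERDICT (by name: the statement is the Claim_ definition above) =====
theorem hstep_acc (M : List Char) (b0 : Int) : M.foldl hstep b0 = b0 * 2 ^ M.length + M.foldl hstep 0 := by
  induction M generalizing b0 with
  | nil => simp
  | cons c t ih =>
    simp only [List.foldl_cons, List.length_cons]
    rw [ih (hstep b0 c), ih (hstep 0 c)]
    simp only [hstep]
    ring

theorem core (L : List Char) (e : Nat) (a b : Int) :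
    (List.range L.length).foldl
      (fun st k => if L[k]? = some '#' then
          (st.1 + 2 ^ (L.length - 1 - k + e), st.2 + 2 ^ k) else st) ((a, b) : Int × Int)
    = (a + 2 ^ e * L.foldl hstep 0, b + L.reverse.foldl hstep 0) := by
  induction L using List.reverseRecOn generalizing e a b with
  | nil => simp
  | append_singleton L c ih =>
    rw [List.length_append, List.length_cons, List.length_nil, Nat.zero_add, List.range_succ,
        List.foldl_append]
    rw [PySem.List.foldl_congr_mem (l := List.range L.length)
        (f := fun (st : Int × Int) k => if (L ++ [c])[k]? = some '#' then
          (st.1 + 2 ^ (L.length + 1 - 1 - k + e), st.2 + 2 ^ k) else st)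
        (init := ((a, b) : Int × Int))
        (g := fun (st : Int × Int) k => if L[k]? = some '#' then
          (st.1 + 2 ^ (L.length - 1 - k + (e + 1)), st.2 + 2 ^ k) else st)
        (by
          intro acc k hk
          have hk' : k < L.length := List.mem_range.mp hk
          simp only [List.getElem?_append_left hk',
            show L.length + 1 - 1 - k + e = L.length - 1 - k + (e + 1) from by omega])]
    rw [ih (e + 1) a b]
    have hget : (L ++ [c])[L.length]? = some c := by
      simp
    have hexp : L.length + 1 - 1 - L.length + e = e := by omega
    rw [List.foldl_append, List.reverse_append, List.reverse_cons, List.reverse_nil,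
        List.nil_append, List.singleton_append]
    simp only [List.foldl_cons, List.foldl_nil, hget, hexp]
    rw [hstep_acc L.reverse (hstep 0 c), List.length_reverse]
    by_cases hc : c = '#' <;> simp only [hc, hstep, Option.some.injEq, if_true, if_false,
      reduceIte, Prod.mk.injEq] <;> constructor <;> ring

theorem encode_side_py_spec : Claim_equal_encode_side_py := by
  intro line _
  show encode_side_py line = encode_side_py_alt line
  unfold encode_side_py encode_side_py_alt
  have hlen : PySem.Str.len line = (line.toList.length : Int) := by
    simp [PySem.Str.len_eq]
  rw [hlen]
  simp only [PySem.List.pyRange_one, List.foldl_map]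
  have h0 : ((line.toList.length : Int) - 0).toNat = line.toList.length := by omega
  rw [h0]
  rw [PySem.List.foldl_congr_mem (l := List.range line.toList.length)
      (f := fun (st : Int × Int) k =>
        if PySem.Str.pyGet? line ((0 : Int) + k) = some '#' then
          (st.1 + 2 ^ (((line.toList.length : Int)) - 1 - ((0 : Int) + k)).toNat,
           st.2 + 2 ^ (((0 : Int) + k)).toNat) else st)
      (init := ((0, 0) : Int × Int))
      (g := fun (st : Int × Int) k =>
      if line.toList[k]? = some '#' then
        (st.1 + 2 ^ (line.toList.length - 1 - k + 0), st.2 + 2 ^ k) else st)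
      (by
        intro acc k hk
        have hk' : k < line.toList.length := List.mem_range.mp hk
        simp only [zero_add, PySem.Str.pyGet?_natCast, Int.toNat_natCast,
          show ((line.toList.length : Int) - 1 - (k : Int)).toNat = line.toList.length - 1 - k + 0
            from by omega])]
  rw [core line.toList 0 0 0]
  norm_num
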